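-- pv_equiv track=rewrite | github.com/IniasP/aoc-2025 | 07/solution.py | trace_part2
-- ===== SOURCE A (Python) =====
-- def trace_part2(timeline_counts: list[int], lines: list[str]):
--     if not lines:
--         return sum(timeline_counts)
--     next_line, *rest_lines = lines
--     for i, char in enumerate(next_line):
--         if char == "^":
--             count = timeline_counts[i]
--             timeline_counts[i - 1] += count
--             timeline_counts[i + 1] += count
--             timeline_counts[i] = 0
--     return trace_part2(timeline_counts, rest_lines)
-- ===== SOURCE B (Python) =====
-- def trace_part2(timeline_counts: list[int], lines: list[str]):
--     for next_line in lines: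
--         for i, char in enumerate(next_line):
--             if char == "^":
--                 count = timeline_counts[i]
--                 timeline_counts[i - 1] += count
--                 timeline_counts[i + 1] += count
--                 timeline_counts[i] = 0
--     return sum(timeline_counts)
-- ===== Notes on version B (the rewrite author's own statement) =====
-- stated objective: idiomatic
-- what changed: Replaced the one-recursive-call-per-line recursion by a plain iterative loop over the lines with the same per-character scan, summing once at the end; this also avoids Python's recursion limit on long inputs.
import Mathlib
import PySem

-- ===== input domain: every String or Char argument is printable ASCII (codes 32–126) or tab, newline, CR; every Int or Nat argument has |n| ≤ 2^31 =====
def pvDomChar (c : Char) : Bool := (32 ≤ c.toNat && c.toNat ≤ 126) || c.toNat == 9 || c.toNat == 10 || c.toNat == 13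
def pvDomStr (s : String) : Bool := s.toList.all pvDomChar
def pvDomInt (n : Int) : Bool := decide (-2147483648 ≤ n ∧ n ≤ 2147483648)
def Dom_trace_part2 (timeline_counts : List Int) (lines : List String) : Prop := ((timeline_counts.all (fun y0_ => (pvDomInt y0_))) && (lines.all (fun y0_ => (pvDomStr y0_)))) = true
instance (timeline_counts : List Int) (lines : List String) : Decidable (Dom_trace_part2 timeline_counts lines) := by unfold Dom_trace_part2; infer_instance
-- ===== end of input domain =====

-- B replaces A's one-recursive-call-per-line recursion by a plain iterative loop with the
-- same per-character scan (idiomatic; avoids Python's recursion limit). Both A and B mutate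
-- timeline_counts in place identically; the equivalence proved here is about the return value.

-- ===== PORT A =====
-- body of the 'if char == "^"' branch, shared verbatim by both Pythons
def pvStep (tc : List Int) (ic : Int × Char) : List Int :=
  if ic.2 = '^' then
    let i := ic.1
    let count := PySem.List.pyGetD tc i 0
    let tc1 := PySem.List.pySetD tc (i - 1) (PySem.List.pyGetD tc (i - 1) 0 + count)
    let tc2 := PySem.List.pySetD tc1 (i + 1) (PySem.List.pyGetD tc1 (i + 1) 0 + count)
    PySem.List.pySetD tc2 i 0
  else tc

def trace_part2 (timeline_counts : List Int) (lines : List String) : Int :=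
  match lines with
  | [] => timeline_counts.foldl (· + ·) 0
  | next_line :: rest_lines =>
      trace_part2 ((PySem.List.enumerate next_line.toList).foldl pvStep timeline_counts) rest_lines

-- ===== PORT B =====
def trace_part2_alt (timeline_counts : List Int) (lines : List String) : Int :=
  (lines.foldl
      (fun tc next_line => (PySem.List.enumerate next_line.toList).foldl pvStep tc)
      timeline_counts).foldl (· + ·) 0

-- ===== PRECONDITION & SPEC =====
-- Pre_ excludes exactly the inputs on which Python A raises IndexError: a '^' at position i
-- of some line with i + 1 >= len(timeline_counts) (the list's length never changes).
def Pre_trace_part2 (timeline_counts : List Int) (lines : List String) : Prop :=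
  (lines.all (fun l =>
    (PySem.List.enumerate l.toList).all (fun ic =>
      ic.2 ≠ '^' || decide (ic.1 + 1 < (timeline_counts.length : Int))))) = true
instance (timeline_counts : List Int) (lines : List String) : Decidable (Pre_trace_part2 timeline_counts lines) := by unfold Pre_trace_part2; infer_instance

def pvWitness_trace_part2 : List Int × List String := ([1, 2, 3, 4], [".^..", "..^."])

def Spec_trace_part2 (timeline_counts : List Int) (lines : List String) (out : Int) : Prop := out = trace_part2_alt timeline_counts lines
instance (timeline_counts : List Int) (lines : List String) (out : Int) : Decidable (Spec_trace_part2 timeline_counts lines out) := by unfold Spec_trace_part2; infer_instance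

-- ===== CLAIM (what is proved, stated in full; the proofs are below) =====
def Claim_equal_trace_part2 : Prop := ∀ (timeline_counts : List Int) (lines : List String), Dom_trace_part2 timeline_counts lines → Pre_trace_part2 timeline_counts lines → Spec_trace_part2 timeline_counts lines (trace_part2 timeline_counts lines)

-- ===== LEMMAS AND PROOFS =====
theorem trace_part2_eq_alt (lines : List String) (tc : List Int) :
    trace_part2 tc lines = trace_part2_alt tc lines := by
  induction lines generalizing tc with
  | nil => rfl
  | cons l rest ih =>
      simp only [trace_part2, trace_part2_alt, List.foldl_cons] at *
      exact ih _

-- ===== VERDICT (by name: the statement is the Claim_ definition above) =====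
theorem trace_part2_spec : Claim_equal_trace_part2 := by
  intro tc lines _ _
  exact trace_part2_eq_alt lines tc
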